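-- pv_equiv track=rewrite | github.com/Sohan331/Game-Development | SpaceFighter/gameAI.py | predict_obstacle_positions
-- ===== SOURCE A (Python) =====
-- def predict_obstacle_positions(obstacles, speed, grid_size, steps=3):
--     """Predict future positions of obstacles based on their speed and direction."""
--     future_positions = set(obstacles)  # Start with current positions
--     rows, cols = grid_size
--
--     for _ in range(steps):  # Predict for the next few steps
--         new_positions = set()
--         for x, y in future_positions:
--             y += speed  # Move obstacle down
--             if 0 <= y < rows:  # Ensure within bounds
--                 new_positions.add((x, y))
--         future_positions.update(new_positions)
--
--     return future_positions
-- ===== SOURCE B (Python) =====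
-- def predict_obstacle_positions(obstacles, speed, grid_size, steps=3):
--     """Frontier propagation: each step shifts only the cells newly reached in the
--     previous step, instead of re-shifting the whole growing set every step."""
--     rows, cols = grid_size
--     result = set(obstacles)
--     frontier = list(dict.fromkeys(obstacles))
--     for _ in range(steps):
--         nxt = []
--         for x, y in frontier:
--             y += speed
--             if 0 <= y < rows and (x, y) not in result:
--                 result.add((x, y))
--                 nxt.append((x, y))
--         frontier = nxt
--     return result
-- ===== Notes on version B (the rewrite author's own statement) =====
-- stated objective: faster
-- what changed: Instead of re-shifting the entire growing position set on every step, B keeps a frontier of cells first reached in the previous step and shifts only those, checking new cells against the accumulated set.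
import Mathlib
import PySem

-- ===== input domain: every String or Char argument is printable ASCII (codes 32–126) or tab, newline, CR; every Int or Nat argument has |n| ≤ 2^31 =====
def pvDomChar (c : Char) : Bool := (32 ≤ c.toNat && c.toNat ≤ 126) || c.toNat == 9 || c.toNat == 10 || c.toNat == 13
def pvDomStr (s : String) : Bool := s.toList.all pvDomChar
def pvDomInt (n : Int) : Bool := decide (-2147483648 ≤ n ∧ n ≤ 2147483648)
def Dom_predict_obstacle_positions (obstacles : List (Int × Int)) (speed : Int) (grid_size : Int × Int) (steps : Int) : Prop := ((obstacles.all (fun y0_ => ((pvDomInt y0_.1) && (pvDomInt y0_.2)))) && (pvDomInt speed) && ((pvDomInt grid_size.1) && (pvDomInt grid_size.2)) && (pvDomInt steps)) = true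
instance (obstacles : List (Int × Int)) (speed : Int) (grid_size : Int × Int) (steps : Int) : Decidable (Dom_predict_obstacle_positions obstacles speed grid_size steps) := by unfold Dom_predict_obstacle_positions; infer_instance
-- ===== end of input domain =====

-- B propagates only the frontier of newly reached cells each step (with a membership
-- check against the accumulated set) instead of re-shifting the entire growing set.

-- ===== PORT A =====
-- literal port of Source A: each step re-shifts every position in the growing set
def predict_obstacle_positions (obstacles : List (Int × Int)) (speed : Int) (grid_size : Int × Int) (steps : Int) : List (Int × Int) :=
  let rows := grid_size.1
  (PySem.List.pyRange 0 steps 1).foldl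
    (fun future _ =>
      PySem.Set.update future
        (future.foldl
          (fun np p =>
            let y := p.2 + speed
            if 0 ≤ y ∧ y < rows then PySem.Set.add np (p.1, y) else np)
          PySem.Set.empty))
    (PySem.Set.ofList obstacles)

-- ===== PORT B =====
-- literal port of Source B: state = (result set, frontier list); only the frontier is shifted
def predict_obstacle_positions_alt (obstacles : List (Int × Int)) (speed : Int) (grid_size : Int × Int) (steps : Int) : List (Int × Int) :=
  let rows := grid_size.1
  ((PySem.List.pyRange 0 steps 1).foldl
    (fun (st : PySem.Set (Int × Int) × List (Int × Int)) _ =>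
      st.2.foldl
        (fun (acc : PySem.Set (Int × Int) × List (Int × Int)) p =>
          let y := p.2 + speed
          if 0 ≤ y ∧ y < rows ∧ (p.1, y) ∉ acc.1
          then (PySem.Set.add acc.1 (p.1, y), acc.2 ++ [(p.1, y)])
          else acc)
        (st.1, ([] : List (Int × Int))))
    (PySem.Set.ofList obstacles, PySem.List.dedup obstacles)).1

-- ===== PRECONDITION & SPEC =====
def Spec_predict_obstacle_positions (obstacles : List (Int × Int)) (speed : Int) (grid_size : Int × Int) (steps : Int) (out : List (Int × Int)) : Prop := out = predict_obstacle_positions_alt obstacles speed grid_size steps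
instance (obstacles : List (Int × Int)) (speed : Int) (grid_size : Int × Int) (steps : Int) (out : List (Int × Int)) : Decidable (Spec_predict_obstacle_positions obstacles speed grid_size steps out) := by unfold Spec_predict_obstacle_positions; infer_instance

-- ===== CLAIM (what is proved, stated in full; the proofs are below) =====
def Claim_equal_predict_obstacle_positions : Prop := ∀ (obstacles : List (Int × Int)) (speed : Int) (grid_size : Int × Int) (steps : Int), Dom_predict_obstacle_positions obstacles speed grid_size steps → Spec_predict_obstacle_positions obstacles speed grid_size steps (predict_obstacle_positions obstacles speed grid_size steps)

-- ===== LEMMAS AND PROOFS =====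

-- the list of genuinely new cells produced by shifting `l` against a growing seen-set `S`
def pvEmit (rows speed : Int) (S : List (Int × Int)) : List (Int × Int) → List (Int × Int)
  | [] => []
  | p :: l =>
    if 0 ≤ p.2 + speed ∧ p.2 + speed < rows ∧ (p.1, p.2 + speed) ∉ S
    then (p.1, p.2 + speed) :: pvEmit rows speed (S ++ [(p.1, p.2 + speed)]) l
    else pvEmit rows speed S l

theorem pvEmit_not_mem (rows speed : Int) :
    ∀ (l S : List (Int × Int)) (q : Int × Int), q ∈ pvEmit rows speed S l → q ∉ S := by
  intro l
  induction l with
  | nil => intro S q h; simp [pvEmit] at h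
  | cons p l ih =>
    intro S q h
    rw [pvEmit] at h
    split at h
    next hc =>
      rcases List.mem_cons.1 h with h1 | h2
      · subst h1; exact hc.2.2
      · exact fun hS => ih _ _ h2 (List.mem_append_left _ hS)
    next => exact ih _ _ h

theorem pvEmit_nodup (rows speed : Int) :
    ∀ (l S : List (Int × Int)), (pvEmit rows speed S l).Nodup := by
  intro l
  induction l with
  | nil => intro S; simp [pvEmit]
  | cons p l ih =>
    intro S
    rw [pvEmit]
    split
    · refine List.nodup_cons.2 ⟨fun hmem => ?_, ih _⟩
      exact pvEmit_not_mem rows speed _ _ _ hmem (List.mem_append_right _ (List.mem_singleton.2 rfl))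
    · exact ih _

theorem pvEmit_covers (rows speed : Int) :
    ∀ (l S : List (Int × Int)) (p : Int × Int), p ∈ l →
      0 ≤ p.2 + speed ∧ p.2 + speed < rows →
      (p.1, p.2 + speed) ∈ S ∨ (p.1, p.2 + speed) ∈ pvEmit rows speed S l := by
  intro l
  induction l with
  | nil => intro S p h; cases h
  | cons q l ih =>
    intro S p hp hb
    rw [pvEmit]
    rcases List.mem_cons.1 hp with rfl | hp'
    · split
      next => right; exact List.mem_cons_self ..
      next hc =>
        left
        by_contra hS
        exact hc ⟨hb.1, hb.2, hS⟩
    · split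
      next hc =>
        rcases ih (S ++ [(q.1, q.2 + speed)]) p hp' hb with h1 | h2
        · rcases List.mem_append.1 h1 with h | h
          · left; exact h
          · right; rw [List.mem_singleton.1 h]; exact List.mem_cons_self ..
        · right; exact List.mem_cons_of_mem _ h2
      next => exact ih S p hp' hb

theorem pvEmit_append_left (rows speed : Int) :
    ∀ (pre l S : List (Int × Int)),
      (∀ p ∈ pre, 0 ≤ p.2 + speed ∧ p.2 + speed < rows → (p.1, p.2 + speed) ∈ S) →
      pvEmit rows speed S (pre ++ l) = pvEmit rows speed S l := by
  intro pre
  induction pre with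
  | nil => intro l S _; rw [List.nil_append]
  | cons p pre ih =>
    intro l S h
    rw [List.cons_append, pvEmit]
    split
    next hc => exact absurd (h p (List.mem_cons_self ..) ⟨hc.1, hc.2.1⟩) hc.2.2
    next => exact ih l S (fun q hq hb => h q (List.mem_cons_of_mem _ hq) hb)

-- A's one step: update the set with all in-bounds shifts
theorem pvStepA_eq (rows speed : Int) :
    ∀ (l res np : List (Int × Int)),
      PySem.Set.update res
        (l.foldl (fun np p =>
            if 0 ≤ p.2 + speed ∧ p.2 + speed < rows then PySem.Set.add np (p.1, p.2 + speed) else np) np)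
      = PySem.Set.update res np ++ pvEmit rows speed (PySem.Set.update res np) l := by
  intro l
  induction l with
  | nil => intro res np; simp [pvEmit]
  | cons p l ih =>
    intro res np
    rw [List.foldl_cons, pvEmit]
    by_cases hb : 0 ≤ p.2 + speed ∧ p.2 + speed < rows
    · rw [if_pos hb, ih res (PySem.Set.add np (p.1, p.2 + speed))]
      by_cases hnp : (p.1, p.2 + speed) ∈ np
      · rw [PySem.Set.add_of_mem hnp,
          if_neg (by
            intro hc
            exact hc.2.2 ((PySem.Set.mem_update res np _).2 (Or.inr hnp)))]
      · rw [PySem.Set.add_of_not_mem hnp]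
        have hupd : PySem.Set.update res (np ++ [(p.1, p.2 + speed)])
            = PySem.Set.add (PySem.Set.update res np) (p.1, p.2 + speed) := by
          simp [PySem.Set.update, List.foldl_append]
        rw [hupd]
        by_cases hu : (p.1, p.2 + speed) ∈ PySem.Set.update res np
        · rw [PySem.Set.add_of_mem hu, if_neg (fun hc => hc.2.2 hu)]
        · rw [PySem.Set.add_of_not_mem hu, if_pos ⟨hb.1, hb.2, hu⟩]
          simp
    · rw [if_neg hb, if_neg (fun hc => hb ⟨hc.1, hc.2.1⟩)]
      exact ih res np

-- B's one step: the inner fold appends exactly the emitted cells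
theorem pvStepB_eq (rows speed : Int) :
    ∀ (fr res nxt : List (Int × Int)),
      fr.foldl
        (fun (acc : PySem.Set (Int × Int) × List (Int × Int)) p =>
          if 0 ≤ p.2 + speed ∧ p.2 + speed < rows ∧ (p.1, p.2 + speed) ∉ acc.1
          then (PySem.Set.add acc.1 (p.1, p.2 + speed), acc.2 ++ [(p.1, p.2 + speed)])
          else acc)
        (res, nxt)
      = (res ++ pvEmit rows speed res fr, nxt ++ pvEmit rows speed res fr) := by
  intro fr
  induction fr with
  | nil => intro res nxt; simp [pvEmit]
  | cons p fr ih =>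
    intro res nxt
    rw [List.foldl_cons, pvEmit]
    by_cases hc : 0 ≤ p.2 + speed ∧ p.2 + speed < rows ∧ (p.1, p.2 + speed) ∉ res
    · rw [if_pos hc, if_pos hc, PySem.Set.add_of_not_mem hc.2.2,
        ih (res ++ [(p.1, p.2 + speed)]) (nxt ++ [(p.1, p.2 + speed)])]
      simp [List.append_assoc]
    · rw [if_neg hc, if_neg hc]
      exact ih res nxt

theorem pvDedup_eq_ofList (xs : List (Int × Int)) :
    PySem.List.dedup xs = PySem.Set.ofList xs := by
  simp [PySem.List.dedup, PySem.Set.ofList]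

theorem pvMain (rows speed : Int) :
    ∀ (L : List Int) (res fr pre : List (Int × Int)),
      res = pre ++ fr → res.Nodup →
      (∀ p ∈ pre, 0 ≤ p.2 + speed ∧ p.2 + speed < rows → (p.1, p.2 + speed) ∈ res) →
      L.foldl (fun future _ => PySem.Set.update future
        (future.foldl (fun np p =>
            if 0 ≤ p.2 + speed ∧ p.2 + speed < rows then PySem.Set.add np (p.1, p.2 + speed) else np)
          PySem.Set.empty)) res
      = (L.foldl (fun (st : PySem.Set (Int × Int) × List (Int × Int)) _ =>
          st.2.foldl
            (fun (acc : PySem.Set (Int × Int) × List (Int × Int)) p =>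
              if 0 ≤ p.2 + speed ∧ p.2 + speed < rows ∧ (p.1, p.2 + speed) ∉ acc.1
              then (PySem.Set.add acc.1 (p.1, p.2 + speed), acc.2 ++ [(p.1, p.2 + speed)])
              else acc)
            (st.1, ([] : List (Int × Int)))) (res, fr)).1 := by
  intro L
  induction L with
  | nil => intro res fr pre hsplit _ _; rfl
  | cons a L ih =>
    intro res fr pre hsplit hnd hclo
    subst hsplit
    have hupd0 : PySem.Set.update (pre ++ fr) (PySem.Set.empty : List (Int × Int)) = pre ++ fr := rfl
    have hfr : pvEmit rows speed (pre ++ fr) (pre ++ fr) = pvEmit rows speed (pre ++ fr) fr :=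
      pvEmit_append_left rows speed pre fr (pre ++ fr) (fun p hp hb => hclo p hp hb)
    have hnd' : ((pre ++ fr) ++ pvEmit rows speed (pre ++ fr) fr).Nodup :=
      List.Nodup.append hnd (pvEmit_nodup rows speed _ _)
        (fun q hq hq' => pvEmit_not_mem rows speed _ _ q hq' hq)
    have hclo' : ∀ p ∈ pre ++ fr, 0 ≤ p.2 + speed ∧ p.2 + speed < rows →
        (p.1, p.2 + speed) ∈ (pre ++ fr) ++ pvEmit rows speed (pre ++ fr) fr := by
      intro p hp hb
      rcases List.mem_append.1 hp with h1 | h2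
      · exact List.mem_append_left _ (hclo p h1 hb)
      · rcases pvEmit_covers rows speed fr (pre ++ fr) p h2 hb with h | h
        · exact List.mem_append_left _ h
        · exact List.mem_append_right _ h
    rw [List.foldl_cons, List.foldl_cons, pvStepB_eq,
      pvStepA_eq rows speed (pre ++ fr) (pre ++ fr) PySem.Set.empty, hupd0, hfr]
    exact ih ((pre ++ fr) ++ pvEmit rows speed (pre ++ fr) fr)
      (pvEmit rows speed (pre ++ fr) fr) (pre ++ fr) rfl hnd' hclo' 

-- ===== VERDICT (by name: the statement is the Claim_ definition above) =====
theorem predict_obstacle_positions_spec : Claim_equal_predict_obstacle_positions := by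
  intro obstacles speed grid_size steps _
  unfold Spec_predict_obstacle_positions predict_obstacle_positions predict_obstacle_positions_alt
  rw [pvDedup_eq_ofList]
  exact pvMain grid_size.1 speed _ _ _ []
    rfl (PySem.Set.nodup_ofList obstacles) (by intro p h; cases h)
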